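-- pv_equiv track=rewrite | github.com/posl/comment_recommendation | script/mod_gen/2_time/en/161_D/5.py | lunlun
-- ===== SOURCE A (Python) =====
-- def lunlun(n):
--     queue = [1,2,3,4,5,6,7,8,9]
--     for i in range(n):
--         ret = queue.pop(0)
--         if ret%10 != 0:
--             queue.append(ret*10 + ret%10 - 1)
--         queue.append(ret*10 + ret%10)
--         if ret%10 != 9:
--             queue.append(ret*10 + ret%10 + 1)
--     return ret
-- ===== SOURCE B (Python) =====
-- def lunlun(n):
--     # Level-by-level BFS: the stream of lunlun numbers is level 0 (1..9),
--     # then each next level is all one-digit extensions of the previous level.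
--     # Skip whole levels until the n-th element falls inside the current one.
--     level = [1, 2, 3, 4, 5, 6, 7, 8, 9]
--     count = 0
--     while n - count > len(level):
--         count += len(level)
--         level = [x * 10 + d for x in level
--                  for d in range(max(0, x % 10 - 1), min(9, x % 10 + 1) + 1)]
--     return level[n - count - 1]
-- ===== Notes on version B (the rewrite author's own statement) =====
-- stated objective: faster
-- what changed: Replaces the single pop(0)/append BFS queue by a level-by-level scheme: whole generations of lunlun numbers are built with a comprehension and skipped by counting until the n-th element is indexed inside the current level, eliminating the O(queue)-cost pop(0).
-- outside the precondition, e.g. on lunlun(0): A raises UnboundLocalError, B returns 9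
import Mathlib
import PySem

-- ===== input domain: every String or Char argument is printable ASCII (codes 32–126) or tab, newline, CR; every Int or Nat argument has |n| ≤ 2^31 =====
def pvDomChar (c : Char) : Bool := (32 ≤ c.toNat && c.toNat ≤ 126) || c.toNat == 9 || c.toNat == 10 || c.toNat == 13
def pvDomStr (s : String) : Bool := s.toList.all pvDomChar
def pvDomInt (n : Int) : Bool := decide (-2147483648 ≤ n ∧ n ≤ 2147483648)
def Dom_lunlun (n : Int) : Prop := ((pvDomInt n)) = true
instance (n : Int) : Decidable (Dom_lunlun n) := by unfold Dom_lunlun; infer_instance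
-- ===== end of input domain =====

-- B replaces A's pop(0)/append BFS queue by a level-by-level generation scheme (faster: no O(queue) pop(0)).

-- ===== PORT A =====
-- one iteration of A's loop body: ret = queue.pop(0); three conditional appends
def stepA (st : List Int × Option Int) : List Int × Option Int :=
  match st.1 with
  | [] => st   -- queue.pop(0) on [] would be IndexError; the queue in A never empties
  | r :: q =>
    let q := if PySem.Int.mod r 10 ≠ 0 then q ++ [r * 10 + PySem.Int.mod r 10 - 1] else q
    let q := q ++ [r * 10 + PySem.Int.mod r 10]
    let q := if PySem.Int.mod r 10 ≠ 9 then q ++ [r * 10 + PySem.Int.mod r 10 + 1] else q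
    (q, some r)

def lunlun (n : Int) : Int :=
  let st := (PySem.List.pyRange 0 n 1).foldl (fun st _ => stepA st) ([1, 2, 3, 4, 5, 6, 7, 8, 9], none)
  st.2.getD 0   -- none = 'ret' unassigned (UnboundLocalError, n ≤ 0); excluded by Pre_

-- ===== PORT B =====
-- [x*10 + d for d in range(max(0, x%10 - 1), min(9, x%10 + 1) + 1)]
def childrenB (x : Int) : List Int :=
  (PySem.List.pyRange (max 0 (PySem.Int.mod x 10 - 1)) (min 9 (PySem.Int.mod x 10 + 1) + 1) 1).map
    (fun d => x * 10 + d)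

-- the while loop of B; fuel only makes the recursion structural (never exhausted under Pre_)
def levelLoop (fuel : Nat) (n count : Int) (level : List Int) : Int :=
  match fuel with
  | 0 => 0
  | fuel + 1 =>
    if n - count > (level.length : Int) then
      levelLoop fuel n (count + level.length) (level.flatMap childrenB)
    else
      (PySem.List.pyGet? level (n - count - 1)).getD 0   -- level[n - count - 1]

def lunlun_alt (n : Int) : Int :=
  levelLoop (n.toNat + 1) n 0 [1, 2, 3, 4, 5, 6, 7, 8, 9]

-- ===== PRECONDITION & SPEC =====
-- Pre_ excludes n ≤ 0: there A's 'ret' is never assigned and A raises UnboundLocalError.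
def Pre_lunlun (n : Int) : Prop := 1 ≤ n
instance (n : Int) : Decidable (Pre_lunlun n) := by unfold Pre_lunlun; infer_instance
def pvWitness_lunlun : Int := 1

def Spec_lunlun (n : Int) (out : Int) : Prop := out = lunlun_alt n
instance (n : Int) (out : Int) : Decidable (Spec_lunlun n out) := by unfold Spec_lunlun; infer_instance

-- ===== CLAIM (what is proved, stated in full; the proofs are below) =====
def Claim_equal_lunlun : Prop := ∀ (n : Int), Dom_lunlun n → Pre_lunlun n → Spec_lunlun n (lunlun n)

-- ===== LEMMAS AND PROOFS =====

-- A's children of r, as one list (the three conditional appends)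
def fA (r : Int) : List Int :=
  (if PySem.Int.mod r 10 ≠ 0 then [r * 10 + PySem.Int.mod r 10 - 1] else []) ++
  [r * 10 + PySem.Int.mod r 10] ++
  (if PySem.Int.mod r 10 ≠ 9 then [r * 10 + PySem.Int.mod r 10 + 1] else [])

lemma stepA_cons (r : Int) (q : List Int) (r0 : Option Int) :
    stepA (r :: q, r0) = (q ++ fA r, some r) := by
  simp only [stepA, fA]
  split_ifs <;> simp

def runA : Nat → List Int × Option Int → List Int × Option Int
  | 0, st => st
  | m + 1, st => runA m (stepA st)

lemma foldl_eq_runA (l : List Int) (st : List Int × Option Int) :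
    l.foldl (fun st _ => stepA st) st = runA l.length st := by
  induction l generalizing st with
  | nil => rfl
  | cons a l ih => simpa [List.foldl, runA] using ih (stepA st)

lemma runA_add (a b : Nat) (st : List Int × Option Int) :
    runA (a + b) st = runA b (runA a st) := by
  induction a generalizing st with
  | zero => rw [Nat.zero_add]; rfl
  | succ a ih =>
    have h : a + 1 + b = (a + b) + 1 := by omega
    rw [h]
    show runA (a + b) (stepA st) = runA b (runA a (stepA st))
    exact ih (stepA st)

def lastO : List Int → Option Int → Option Int
  | [], r => r
  | a :: q, _ => lastO q (some a)

lemma runA_drop (q t : List Int) (r : Option Int) :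
    runA q.length (q ++ t, r) = (t ++ q.flatMap fA, lastO q r) := by
  induction q generalizing t r with
  | nil => simp [runA, lastO]
  | cons a q ih =>
    show runA (q.length + 1) (a :: (q ++ t), r) = _
    rw [Nat.add_comm, runA_add]
    show runA q.length (stepA (a :: (q ++ t), r)) = _
    rw [stepA_cons, show (q ++ t) ++ fA a = q ++ (t ++ fA a) by simp, ih]
    simp [lastO, List.flatMap_cons]

lemma runA_snd (m : Nat) (q t : List Int) (r : Option Int) (hm : m < q.length) :
    (runA (m + 1) (q ++ t, r)).2 = some q[m] := by
  induction m generalizing q t r with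
  | zero =>
    match q with
    | a :: q =>
      show (runA 0 (stepA (a :: (q ++ t), r))).2 = _
      rw [stepA_cons]; rfl
  | succ m ih =>
    match q with
    | a :: q =>
      show (runA (m + 1) (stepA (a :: (q ++ t), r))).2 = _
      rw [stepA_cons, show (q ++ t) ++ fA a = q ++ (t ++ fA a) by simp]
      have hm' : m < q.length := by simpa using hm
      rw [ih q (t ++ fA a) (some a) hm']
      simp

lemma mod10_bounds (x : Int) : 0 ≤ PySem.Int.mod x 10 ∧ PySem.Int.mod x 10 < 10 :=
  ⟨PySem.Int.mod_nonneg x (by norm_num), PySem.Int.mod_lt x (by norm_num)⟩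

lemma fA_eq_childrenB (x : Int) : fA x = childrenB x := by
  obtain ⟨h0, h1⟩ := mod10_bounds x
  unfold fA childrenB
  generalize PySem.Int.mod x 10 = l at h0 h1 ⊢
  interval_cases l <;>
    norm_num [PySem.List.pyRange_one, show (2 : Int).toNat = 2 from rfl,
      show (3 : Int).toNat = 3 from rfl, List.range_succ, Function.comp] <;> omega

lemma fA_ne_nil (x : Int) : fA x ≠ [] := by
  unfold fA; split_ifs <;> simp

lemma flatMap_fA_ne_nil (q : List Int) (hq : q ≠ []) : q.flatMap fA ≠ [] := by
  match q with
  | a :: q =>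
    simp only [List.flatMap_cons, ne_eq, List.append_eq_nil_iff, not_and]
    intro h; exact absurd h (fA_ne_nil a)

lemma main_lemma (fuel : Nat) (n : Int) :
    ∀ (count : Int) (q : List Int) (r : Option Int), q ≠ [] →
    1 ≤ n - count → n - count ≤ (fuel : Int) →
    ((runA (n - count).toNat (q, r)).2).getD 0 = levelLoop fuel n count q := by
  induction fuel with
  | zero => intro count q r _ h1 h2; omega
  | succ fuel ih =>
    intro count q r hq h1 h2
    rw [levelLoop]
    have hlq : 0 < q.length := List.length_pos_of_ne_nil hq
    by_cases h : n - count > (q.length : Int)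
    · rw [if_pos h]
      have hm : (n - count).toNat = q.length + ((n - (count + q.length)).toNat) := by omega
      have hdrop : runA q.length (q, r) = (q.flatMap fA, lastO q r) := by
        simpa using runA_drop q [] r
      rw [hm, runA_add, hdrop]
      rw [ih (count + q.length) (q.flatMap fA) (lastO q r)
            (flatMap_fA_ne_nil q hq) (by omega) (by omega)]
      congr 1
      exact List.flatMap_congr (fun x _ => fA_eq_childrenB x)
    · rw [if_neg h]
      have hlen : (n - count).toNat ≤ q.length := by omega
      have hm : (n - count).toNat = ((n - count).toNat - 1) + 1 := by omega
      have hlt : (n - count).toNat - 1 < q.length := by omega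
      have hsnd : (runA ((n - count).toNat - 1 + 1) (q, r)).2 = some q[(n - count).toNat - 1] := by
        simpa using runA_snd ((n - count).toNat - 1) q [] r hlt
      have hidx : n - count - 1 = (((n - count).toNat - 1 : Nat) : Int) := by omega
      rw [hm, hsnd, hidx, PySem.List.pyGet?_natCast, List.getElem?_eq_getElem hlt]

-- ===== VERDICT (by name: the statement is the Claim_ definition above) =====
theorem lunlun_spec : Claim_equal_lunlun := by
  intro n _ hpre
  have h1 : (1 : Int) ≤ n := hpre
  unfold Spec_lunlun lunlun lunlun_alt
  rw [foldl_eq_runA, PySem.List.length_pyRange_one]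
  have := main_lemma (n.toNat + 1) n 0 [1, 2, 3, 4, 5, 6, 7, 8, 9] none (by simp)
    (by omega) (by omega)
  simpa using this
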